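-- pv_equiv track=rewrite | github.com/josephdepaoloboisvert/YANKsuite | YankSuite.py | get_from_yaml
-- ===== SOURCE A (Python) =====
-- def get_from_yaml(name, yaml_contents):
--     truth_list = [True if name in line else False for line in yaml_contents]
--     if True in truth_list:
--         idj = truth_list.index(True)
--         idk = yaml_contents[idj].index(':')
--         return yaml_contents[idj][idk + 2:]  # Colon space beginseq
--     else:
--         raise Exception('%s not found in yaml_contents'%name)
-- ===== SOURCE B (Python) =====
-- def get_from_yaml(name, yaml_contents):
--     for line in yaml_contents:
--         if name in line:
--             idk = line.index(':')
--             return line[idk + 2:]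
--     raise Exception('%s not found in yaml_contents' % name)
-- ===== Notes on version B (the rewrite author's own statement) =====
-- stated objective: simpler
-- what changed: Single pass over yaml_contents returning on the first line containing name, instead of materializing a boolean truth_list and then scanning it again with list.index(True) and re-indexing the list.
import Mathlib
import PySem

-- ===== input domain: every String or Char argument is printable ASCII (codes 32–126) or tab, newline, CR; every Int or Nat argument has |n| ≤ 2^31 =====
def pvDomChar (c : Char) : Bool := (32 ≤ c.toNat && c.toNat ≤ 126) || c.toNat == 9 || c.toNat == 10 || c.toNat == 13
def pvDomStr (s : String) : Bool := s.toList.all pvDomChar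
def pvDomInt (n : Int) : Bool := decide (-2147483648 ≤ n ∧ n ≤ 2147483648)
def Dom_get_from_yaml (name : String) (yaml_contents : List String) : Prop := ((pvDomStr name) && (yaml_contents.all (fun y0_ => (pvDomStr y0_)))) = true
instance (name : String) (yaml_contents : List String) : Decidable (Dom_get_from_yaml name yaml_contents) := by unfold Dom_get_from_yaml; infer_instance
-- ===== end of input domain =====

-- B replaces A's build-truth-list-then-index pattern with a single early-exit pass; objective: simpler.


-- ===== PORT A =====
def get_from_yaml (name : String) (yaml_contents : List String) : String :=
  let truth_list := yaml_contents.map (fun line => PySem.Str.isIn name line)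
  if truth_list.contains true then
    match PySem.List.index? truth_list true with
    | none => ""        -- unreachable: contains true holds
    | some idj =>
      match PySem.List.pyGet? yaml_contents (idj : Int) with
      | none => ""      -- unreachable: idj is a valid index
      | some line =>
        let idk := PySem.Str.find line ":"
        if idk = -1 then ""   -- .index raises ValueError: excluded by Pre_
        else PySem.Str.slice line (some (idk + 2)) none
  else ""               -- raise Exception: excluded by Pre_

-- ===== PORT B =====
def getFromYamlLoop (name : String) : List String → String
  | [] => ""            -- raise Exception: excluded by Pre_
  | line :: rest =>
    if PySem.Str.isIn name line then
      let idk := PySem.Str.find line ":"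
      if idk = -1 then ""    -- .index raises ValueError: excluded by Pre_
      else PySem.Str.slice line (some (idk + 2)) none
    else getFromYamlLoop name rest

def get_from_yaml_alt (name : String) (yaml_contents : List String) : String :=
  getFromYamlLoop name yaml_contents

-- ===== PRECONDITION & SPEC =====
-- Pre_ excludes exactly the inputs on which A raises: no line contains name (Exception),
-- or the first line containing name has no ':' (ValueError from .index).
def Pre_get_from_yaml (name : String) (yaml_contents : List String) : Prop :=
  ((yaml_contents.find? (fun line => PySem.Str.isIn name line)).elim
    false (fun line => PySem.Str.isIn ":" line)) = true
instance (name : String) (yaml_contents : List String) : Decidable (Pre_get_from_yaml name yaml_contents) := by unfold Pre_get_from_yaml; infer_instance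

def pvWitness_get_from_yaml : String × List String := ("name", ["# comment", "name: value"])

def Spec_get_from_yaml (name : String) (yaml_contents : List String) (out : String) : Prop := out = get_from_yaml_alt name yaml_contents
instance (name : String) (yaml_contents : List String) (out : String) : Decidable (Spec_get_from_yaml name yaml_contents out) := by unfold Spec_get_from_yaml; infer_instance

-- ===== CLAIM (what is proved, stated in full; the proofs are below) =====
def Claim_equal_get_from_yaml : Prop := ∀ (name : String) (yaml_contents : List String), Dom_get_from_yaml name yaml_contents → Pre_get_from_yaml name yaml_contents → Spec_get_from_yaml name yaml_contents (get_from_yaml name yaml_contents)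

-- ===== LEMMAS AND PROOFS =====
lemma get_from_yaml_eq_loop (name : String) (ycs : List String)
    (h : Pre_get_from_yaml name ycs) :
    get_from_yaml name ycs = getFromYamlLoop name ycs := by
  induction ycs with
  | nil => simp [Pre_get_from_yaml] at h
  | cons l rest ih =>
    by_cases hl : PySem.Str.isIn name l = true
    · have hlc : PySem.Chars.isIn name.toList l.toList = true := by simpa using hl
      have hPre' : PySem.Str.isIn ":" l = true := by
        unfold Pre_get_from_yaml at h
        simpa [List.find?_cons, hlc] using h
      have hfind : PySem.Chars.find l.toList [':'] ≠ -1 := by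
        rw [PySem.Chars.find_ne_neg_one_iff]
        have := (PySem.Str.isIn_iff_infix ":" l).mp hPre'
        simpa using this
      simp [get_from_yaml, getFromYamlLoop, hlc, List.idxOf?, List.findIdx?_cons, hfind]
    · have hl' : PySem.Str.isIn name l = false := by simpa using hl
      have hl'c : PySem.Chars.isIn name.toList l.toList = false := by simpa using hl
      have hrest : Pre_get_from_yaml name rest := by
        unfold Pre_get_from_yaml at h ⊢
        simpa [List.find?_cons, hl'c] using h
      have hAstep : get_from_yaml name (l :: rest) = get_from_yaml name rest := by
        unfold get_from_yaml
        simp only [List.map_cons, hl']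
        rw [PySem.List.index?_cons_of_ne (rest.map (fun line => PySem.Str.isIn name line))
              (show (false : Bool) ≠ true by decide)]
        by_cases hc : (rest.map (fun line => PySem.Str.isIn name line)).contains true
        · rw [if_pos (by simpa [hl'] using hc), if_pos hc]
          obtain ⟨k, hk⟩ := Option.isSome_iff_exists.mp
            ((PySem.List.index?_isSome_iff (rest.map (fun line => PySem.Str.isIn name line))
              true).mpr (by simpa using hc))
          rw [hk]
          simp only [Option.map_some]
          have hget : PySem.List.pyGet? (l :: rest) ((k + 1 : Nat) : Int)
              = PySem.List.pyGet? rest (k : Int) := by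
            have := PySem.List.pyGet?_cons_succ l rest k
            simpa using this
          rw [hget]
        · rw [if_neg (by simpa [hl'] using hc), if_neg hc]
      rw [hAstep, ih hrest]
      simp [getFromYamlLoop, hl'c]

-- ===== VERDICT (by name: the statement is the Claim_ definition above) =====
theorem get_from_yaml_spec : Claim_equal_get_from_yaml := by
  intro name ycs _ hpre
  unfold Spec_get_from_yaml get_from_yaml_alt
  exact get_from_yaml_eq_loop name ycs hpre
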